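-- pv_equiv track=rewrite | github.com/RDLLab/lci-net | partially_obserable/agents/qn_lcinet_agent.py | build_shifts
-- ===== SOURCE A (Python) =====
-- def build_shifts(features, lower, upper, use_simple_dirs):
--     """
--     Helper method for building a list of shift directions. If use_simple_dirs is False, covers every combination of
--     relative position changes between lower and upper in each dimension. Otherwise, covers orthogonal combinations only.
--     """
--     assert len(lower) == len(upper)
--     if len(lower) == 0:
--         # base case
--         return features
--     # recursive case
--     current_lower = lower[0]
--     new_lower = lower[1:]
--     current_upper = upper[0]
--     new_upper = upper[1:]
--
--     if len(features) == 0: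
--         # no existing features
--         features_new = []
--         for i in range(current_lower, current_upper):
--             features_new.append([i])
--     else:
--         # add to existing features
--         if use_simple_dirs:
--             # apply simple shifts only
--             features_new = []
--             for f in features:
--                 f_is_empty = True
--                 for x in f:
--                     if x != 0:
--                         f_is_empty = False
--
--                 if f_is_empty:
--                     for i in range(current_lower, current_upper):
--                         features_new.append(f + [i])
--                 else:
--                     features_new.append(f + [0])
--         else:
--             # apply all possible shifts
--             features_new = []
--             for f in features:
--                 for i in range(current_lower, current_upper):
--                     features_new.append(f + [i])
--     return build_shifts(features_new, new_lower, new_upper, use_simple_dirs)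
-- ===== SOURCE B (Python) =====
-- def build_shifts(features, lower, upper, use_simple_dirs):
--     """Iterative version: one pass over the zipped dimension bounds,
--     rebuilding the feature list with comprehensions at each dimension."""
--     assert len(lower) == len(upper)
--     for lo, up in zip(lower, upper):
--         if not features:
--             features = [[i] for i in range(lo, up)]
--         elif use_simple_dirs:
--             features = [g for f in features for g in
--                         ([f + [0]] if any(x != 0 for x in f)
--                          else [f + [i] for i in range(lo, up)])]
--         else:
--             features = [f + [i] for f in features for i in range(lo, up)]
--     return features
-- ===== Notes on version B (the rewrite author's own statement) =====
-- stated objective: simpler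
-- what changed: Replaced the tail recursion over list slices by a single loop over zip(lower, upper), with the per-dimension rebuild expressed as comprehensions (flatMap) and the all-zero test as any(x != 0) instead of an accumulator-flag inner loop.
import Mathlib
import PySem

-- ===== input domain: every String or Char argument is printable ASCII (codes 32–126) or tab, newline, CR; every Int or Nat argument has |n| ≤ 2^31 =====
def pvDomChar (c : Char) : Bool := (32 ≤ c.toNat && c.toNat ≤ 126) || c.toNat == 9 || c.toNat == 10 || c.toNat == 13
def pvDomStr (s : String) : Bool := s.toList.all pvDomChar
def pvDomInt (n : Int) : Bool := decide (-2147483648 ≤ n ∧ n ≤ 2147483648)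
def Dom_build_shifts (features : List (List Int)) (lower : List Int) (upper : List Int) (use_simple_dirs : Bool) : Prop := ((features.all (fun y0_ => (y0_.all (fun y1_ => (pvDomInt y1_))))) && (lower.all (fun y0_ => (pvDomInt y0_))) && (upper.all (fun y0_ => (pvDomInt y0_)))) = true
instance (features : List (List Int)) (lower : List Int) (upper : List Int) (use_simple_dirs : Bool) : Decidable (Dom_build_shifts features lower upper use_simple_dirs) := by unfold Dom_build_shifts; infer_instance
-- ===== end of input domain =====

-- B replaces A's tail recursion over list slices by one fold over zip(lower, upper) with
-- flatMap/map comprehensions per dimension (objective: simpler).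


-- ===== PORT A =====
-- literal transliteration of A's recursion; the '| _, _' arms are unreachable under
-- Pre_ (there the Python assert raises) and return features arbitrarily
def build_shifts (features : List (List Int)) (lower : List Int) (upper : List Int) (use_simple_dirs : Bool) : List (List Int) :=
  match lower, upper with
  | [], [] => features
  | current_lower :: new_lower, current_upper :: new_upper =>
      let features_new :=
        if features.length == 0 then
          (PySem.List.pyRange current_lower current_upper 1).foldl
            (fun acc i => acc ++ [[i]]) []
        else if use_simple_dirs then
          features.foldl (fun acc f =>
            let f_is_empty := f.foldl (fun b x => if x != 0 then false else b) true
            if f_is_empty then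
              (PySem.List.pyRange current_lower current_upper 1).foldl
                (fun acc2 i => acc2 ++ [f ++ [i]]) acc
            else acc ++ [f ++ [0]]) []
        else
          features.foldl (fun acc f =>
            (PySem.List.pyRange current_lower current_upper 1).foldl
              (fun acc2 i => acc2 ++ [f ++ [i]]) acc) []
      build_shifts features_new new_lower new_upper use_simple_dirs
  | _, _ => features

-- ===== PORT B =====
def build_shifts_alt (features : List (List Int)) (lower : List Int) (upper : List Int) (use_simple_dirs : Bool) : List (List Int) :=
  (lower.zip upper).foldl (fun fs p =>
    if fs.isEmpty then
      (PySem.List.pyRange p.1 p.2 1).map (fun i => [i])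
    else if use_simple_dirs then
      fs.flatMap (fun f =>
        if f.any (fun x => x != 0) then [f ++ [0]]
        else (PySem.List.pyRange p.1 p.2 1).map (fun i => f ++ [i]))
    else
      fs.flatMap (fun f => (PySem.List.pyRange p.1 p.2 1).map (fun i => f ++ [i])))
    features

-- ===== PRECONDITION & SPEC =====
-- A's assert raises AssertionError unless the two bound lists have equal length
def Pre_build_shifts (features : List (List Int)) (lower : List Int) (upper : List Int) (use_simple_dirs : Bool) : Prop :=
  lower.length = upper.length
instance (features : List (List Int)) (lower : List Int) (upper : List Int) (use_simple_dirs : Bool) : Decidable (Pre_build_shifts features lower upper use_simple_dirs) := by unfold Pre_build_shifts; infer_instance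

def pvWitness_build_shifts : List (List Int) × List Int × List Int × Bool := ([], [-1], [2], true)

def Spec_build_shifts (features : List (List Int)) (lower : List Int) (upper : List Int) (use_simple_dirs : Bool) (out : List (List Int)) : Prop := out = build_shifts_alt features lower upper use_simple_dirs
instance (features : List (List Int)) (lower : List Int) (upper : List Int) (use_simple_dirs : Bool) (out : List (List Int)) : Decidable (Spec_build_shifts features lower upper use_simple_dirs out) := by unfold Spec_build_shifts; infer_instance

-- ===== CLAIM (what is proved, stated in full; the proofs are below) =====
def Claim_equal_build_shifts : Prop := ∀ (features : List (List Int)) (lower : List Int) (upper : List Int) (use_simple_dirs : Bool), Dom_build_shifts features lower upper use_simple_dirs → Pre_build_shifts features lower upper use_simple_dirs → Spec_build_shifts features lower upper use_simple_dirs (build_shifts features lower upper use_simple_dirs)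

-- ===== LEMMAS AND PROOFS =====

-- any-nonzero is the negation of all-zero
theorem any_ne_eq_not_all (f : List Int) :
    (f.any (fun x => x != 0)) = !(f.all (fun x => x == 0)) := by
  induction f with
  | nil => simp
  | cons y ys ihy => simp [bne] at ihy ⊢; simp [ihy]

-- flatMap of a singleton-producing function is map
theorem flatMap_single {α β : Type} (l : List α) (f : α → β) :
    l.flatMap (fun x => [f x]) = l.map f := by
  induction l with
  | nil => rfl
  | cons x xs ih => simp [ih]

-- A's inner flag loop computes "all entries are zero"
theorem empty_flag_eq_all (f : List Int) (b : Bool) :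
    f.foldl (fun b x => if x != 0 then false else b) b = (b && f.all (fun x => x == 0)) := by
  induction f generalizing b with
  | nil => simp
  | cons x xs ih =>
      simp only [List.foldl_cons, List.all_cons, ih]
      by_cases hx : x = 0 <;> simp [hx]

-- the per-dimension step of A equals the per-dimension step of B
theorem step_eq (features : List (List Int)) (cl cu : Int) (u : Bool) :
    (if features.length == 0 then
        (PySem.List.pyRange cl cu 1).foldl (fun acc i => acc ++ [[i]]) []
      else if u then
        features.foldl (fun acc f =>
          let f_is_empty := f.foldl (fun b x => if x != 0 then false else b) true
          if f_is_empty then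
            (PySem.List.pyRange cl cu 1).foldl (fun acc2 i => acc2 ++ [f ++ [i]]) acc
          else acc ++ [f ++ [0]]) []
      else
        features.foldl (fun acc f =>
          (PySem.List.pyRange cl cu 1).foldl (fun acc2 i => acc2 ++ [f ++ [i]]) acc) []) =
    (if features.isEmpty then
        (PySem.List.pyRange cl cu 1).map (fun i => [i])
      else if u then
        features.flatMap (fun f =>
          if f.any (fun x => x != 0) then [f ++ [0]]
          else (PySem.List.pyRange cl cu 1).map (fun i => f ++ [i]))
      else
        features.flatMap (fun f => (PySem.List.pyRange cl cu 1).map (fun i => f ++ [i]))) := by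
  have hmt : (features.length == 0) = features.isEmpty := by
    cases features <;> simp
  rw [hmt]
  by_cases he : features.isEmpty
  · simp [he, PySem.List.foldl_append_singleton_eq_map, ← List.flatMap_def, flatMap_single]
  · simp only [he, if_neg, Bool.false_eq_true, if_false]
    cases u with
    | true =>
        simp only [if_pos rfl, empty_flag_eq_all, Bool.true_and,
          PySem.List.foldl_append_singleton_eq_map,
          PySem.List.foldl_append_eq_flatMap]
        rw [show (fun acc f =>
              if (f : List Int).all (fun x => x == 0) = true then
                acc ++ (PySem.List.pyRange cl cu 1).map (fun i => f ++ [i])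
              else acc ++ [f ++ [0]]) =
            (fun acc f => acc ++ (if (f : List Int).all (fun x => x == 0) = true then
                (PySem.List.pyRange cl cu 1).map (fun i => f ++ [i])
              else [f ++ [0]])) from by
          funext acc f; split <;> rfl]
        rw [PySem.List.foldl_append_eq_flatMap]
        simp only [List.nil_append]
        apply List.flatMap_congr  -- pointwise: any-nonzero is the negation of all-zero
        intro f _
        rw [any_ne_eq_not_all f]
        cases hall : f.all (fun x => x == 0) <;> simp
    | false =>
        simp [PySem.List.foldl_append_singleton_eq_map,
          ← List.flatMap_def, flatMap_single]

theorem build_eq (lower : List Int) : ∀ (upper : List Int) (features : List (List Int)) (u : Bool),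
    lower.length = upper.length →
    build_shifts features lower upper u = build_shifts_alt features lower upper u := by
  induction lower with
  | nil =>
      intro upper features u h
      cases upper with
      | nil => rfl
      | cons c cs => simp at h
  | cons cl nl ih =>
      intro upper features u h
      cases upper with
      | nil => simp at h
      | cons cu nu =>
          have hlen : nl.length = nu.length := by simpa using h
          show build_shifts _ (cl :: nl) (cu :: nu) u = _
          rw [build_shifts]
          simp only [build_shifts_alt, List.zip_cons_cons, List.foldl_cons]
          rw [ih nu _ u hlen]
          unfold build_shifts_alt
          rw [step_eq]

-- ===== VERDICT (by name: the statement is the Claim_ definition above) =====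
theorem build_shifts_spec : Claim_equal_build_shifts := by
  intro features lower upper u _ hpre
  unfold Spec_build_shifts
  exact build_eq lower upper features u hpre
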